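-- pv_equiv track=rewrite | github.com/BOLTB0X/DataStructure_Argolithm | BOJ/정렬/24051.py | solution
-- ===== SOURCE A (Python) =====
-- def solution(n, k, a):
--     res, cnt = 0, 0
--
--     for i in range(1, n):
--         loc = i-1
--         newItem = a[i]
--
--         while loc >= 0 and newItem < a[loc]:
--             a[loc+1] = a[loc]
--             loc -= 1
--             cnt += 1
--             if cnt == k:
--                 res = a[loc+1]
--
--         if loc + 1 != i:
--             a[loc+1] = newItem
--             cnt += 1
--             if cnt == k:
--                 res = a[loc+1]
--
--     return res if cnt >= k else -1
-- ===== SOURCE B (Python) =====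
-- # B: instead of simulating each insertion-sort write, keep a sorted prefix,
-- # binary-search the insertion point, and jump arithmetically to the k-th write.
-- # Note: A mutates `a` in place; B does not (equivalence is about the return value).
--
-- def _bisect_right(s, x):
--     lo, hi = 0, len(s)
--     while lo < hi:
--         mid = (lo + hi) // 2
--         if x < s[mid]:
--             hi = mid
--         else:
--             lo = mid + 1
--     return lo
--
--
-- def solution(n, k, a):
--     res, cnt = 0, 0
--     s = a[:1]
--     for i in range(1, n):
--         x = a[i]
--         pos = _bisect_right(s, x)
--         m = i - pos
--         if m > 0:
--             if cnt < k <= cnt + m: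
--                 res = s[i - (k - cnt)]
--             elif k == cnt + m + 1:
--                 res = x
--             cnt += m + 1
--         s.insert(pos, x)
--     return res if cnt >= k else -1
-- ===== Notes on version B (the rewrite author's own statement) =====
-- stated objective: faster
-- what changed: Instead of simulating every single insertion-sort shift write on the array, B maintains a sorted prefix, binary-searches each element's insertion point, and locates the k-th write arithmetically from per-element shift counts (indexing the sorted prefix by rank).
import Mathlib
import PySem

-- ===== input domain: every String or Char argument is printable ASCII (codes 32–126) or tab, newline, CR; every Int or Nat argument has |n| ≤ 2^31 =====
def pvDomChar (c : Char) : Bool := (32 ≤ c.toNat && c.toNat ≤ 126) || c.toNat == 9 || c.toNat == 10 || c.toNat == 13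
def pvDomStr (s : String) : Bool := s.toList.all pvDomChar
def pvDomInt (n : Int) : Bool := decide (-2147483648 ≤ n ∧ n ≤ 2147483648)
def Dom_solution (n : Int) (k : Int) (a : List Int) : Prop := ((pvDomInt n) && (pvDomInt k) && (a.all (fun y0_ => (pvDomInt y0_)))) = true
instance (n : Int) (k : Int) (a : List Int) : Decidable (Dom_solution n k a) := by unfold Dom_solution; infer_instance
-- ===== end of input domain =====

-- B counts the insertion-sort writes per element via binary search on a sorted prefix and
-- jumps arithmetically to the k-th write, instead of simulating every shift like A.
-- A mutates its list argument in place; B does not (the claim is about the return value).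

-- ===== PORT A =====
-- the inner while loop; fuel = i bounds the iterations (loc runs from i-1 down to ≥ -1);
-- writes a[loc+1] use List.set on the nonnegative index, exact under Pre_ (index in range)
def solInnerA (k : Int) : Nat → List Int → Int → Int → Int → Int → (List Int × Int × Int × Int)
  | 0, arr, _, loc, cnt, res => (arr, loc, cnt, res)
  | fuel+1, arr, x, loc, cnt, res =>
    if loc ≥ 0 ∧ x < PySem.List.pyGetD arr loc 0 then
      let arr' := arr.set (loc+1).toNat (PySem.List.pyGetD arr loc 0)
      let loc' := loc - 1
      let cnt' := cnt + 1
      let res' := if cnt' = k then PySem.List.pyGetD arr' (loc'+1) 0 else res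
      solInnerA k fuel arr' x loc' cnt' res'
    else (arr, loc, cnt, res)

def solStepA (k : Int) (st : List Int × Int × Int) (i : Int) : List Int × Int × Int :=
  let arr := st.1
  let newItem := PySem.List.pyGetD arr i 0
  let r := solInnerA k i.toNat arr newItem (i-1) st.2.1 st.2.2
  let loc := r.2.1
  if loc + 1 ≠ i then
    let arr'' := r.1.set (loc+1).toNat newItem
    let cnt'' := r.2.2.1 + 1
    (arr'', cnt'', if cnt'' = k then PySem.List.pyGetD arr'' (loc+1) 0 else r.2.2.2)
  else (r.1, r.2.2.1, r.2.2.2)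

def solution (n : Int) (k : Int) (a : List Int) : Int :=
  let st := (PySem.List.pyRange 1 n 1).foldl (solStepA k) (a, 0, 0)
  if st.2.1 ≥ k then st.2.2 else -1

-- ===== PORT B =====
-- _bisect_right from Source B
def bisectR (s : List Int) (x : Int) (lo hi : Nat) : Nat :=
  if lo < hi then
    let mid := (lo + hi) / 2
    if x < PySem.List.pyGetD s (mid : Int) 0 then bisectR s x lo mid
    else bisectR s x (mid + 1) hi
  else lo
termination_by hi - lo
decreasing_by all_goals omega

def solStepB (k : Int) (a : List Int) (st : List Int × Int × Int) (i : Int) : List Int × Int × Int :=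
  let s := st.1
  let cnt := st.2.1
  let x := PySem.List.pyGetD a i 0
  let pos := bisectR s x 0 s.length
  let m : Int := i - pos
  if 0 < m then
    let res' := if cnt < k ∧ k ≤ cnt + m then PySem.List.pyGetD s (i - (k - cnt)) 0
                else if k = cnt + m + 1 then x else st.2.2
    (PySem.List.insert s (pos : Int) x, cnt + m + 1, res')
  else (PySem.List.insert s (pos : Int) x, cnt, st.2.2)

def solution_alt (n : Int) (k : Int) (a : List Int) : Int :=
  let st := (PySem.List.pyRange 1 n 1).foldl (solStepB k a) (PySem.List.slice a none (some 1), 0, 0)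
  if st.2.1 ≥ k then st.2.2 else -1

-- ===== PRECONDITION & SPEC =====
-- A raises IndexError (a[i] with i ≥ len(a)) exactly when n > len(a); nothing else is excluded
def Pre_solution (n : Int) (k : Int) (a : List Int) : Prop := n ≤ (a.length : Int)
instance (n : Int) (k : Int) (a : List Int) : Decidable (Pre_solution n k a) := by unfold Pre_solution; infer_instance

def pvWitness_solution : Int × Int × List Int := (4, 3, [3, 1, 4, 2])

def Spec_solution (n : Int) (k : Int) (a : List Int) (out : Int) : Prop := out = solution_alt n k a
instance (n : Int) (k : Int) (a : List Int) (out : Int) : Decidable (Spec_solution n k a out) := by unfold Spec_solution; infer_instance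

-- ===== CLAIM (what is proved, stated in full; the proofs are below) =====
def Claim_equal_solution : Prop := ∀ (n : Int) (k : Int) (a : List Int), Dom_solution n k a → Pre_solution n k a → Spec_solution n k a (solution n k a)

-- ===== LEMMAS AND PROOFS =====

-- sorted access is monotone
theorem sorted_getD_le (s : List Int) (hs : s.Pairwise (· ≤ ·)) (i j : Nat)
    (hij : i ≤ j) (hj : j < s.length) : s.getD i 0 ≤ s.getD j 0 := by
  rcases eq_or_lt_of_le hij with rfl | h
  · exact le_refl _
  · rw [List.getD_eq_getElem s 0 (by omega), List.getD_eq_getElem s 0 hj]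
    exact (List.pairwise_iff_getElem.mp hs) i j (by omega) hj h

-- bisectR spec: window invariant
theorem bisectR_spec (s : List Int) (x : Int) (hs : s.Pairwise (· ≤ ·)) :
    ∀ (d : Nat) (lo hi : Nat), hi - lo ≤ d → lo ≤ hi → hi ≤ s.length →
    (∀ j, j < lo → s.getD j 0 ≤ x) → (∀ j, hi ≤ j → j < s.length → x < s.getD j 0) →
    lo ≤ bisectR s x lo hi ∧ bisectR s x lo hi ≤ hi ∧
    (∀ j, j < bisectR s x lo hi → s.getD j 0 ≤ x) ∧
    (∀ j, bisectR s x lo hi ≤ j → j < s.length → x < s.getD j 0) := by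
  intro d
  induction d with
  | zero =>
    intro lo hi hd hlohi hhi hlow hhigh
    have hnot : ¬ lo < hi := by omega
    rw [bisectR, if_neg hnot]
    exact ⟨le_refl _, hlohi, hlow, fun j hj hjl => hhigh j (by omega) hjl⟩
  | succ d ih =>
    intro lo hi hd hlohi hhi hlow hhigh
    rw [bisectR]
    by_cases h : lo < hi
    · simp only [if_pos h]
      have hmidlt : (lo + hi) / 2 < hi := by omega
      have hmidge : lo ≤ (lo + hi) / 2 := by omega
      have hmlen : (lo + hi) / 2 < s.length := by omega
      rw [PySem.List.pyGetD_natCast]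
      by_cases hc : x < s.getD ((lo + hi) / 2) 0
      · simp only [if_pos hc]
        have := ih lo ((lo + hi) / 2) (by omega) hmidge (by omega) hlow
          (fun j hj hjl => lt_of_lt_of_le hc (sorted_getD_le s hs _ j hj hjl))
        exact ⟨this.1, le_trans this.2.1 (by omega), this.2.2⟩
      · simp only [if_neg hc]
        push_neg at hc
        have := ih ((lo + hi) / 2 + 1) hi (by omega) (by omega) hhi
          (fun j hj => le_trans (sorted_getD_le s hs j _ (by omega) hmlen) hc) hhigh
        exact ⟨le_trans (by omega) this.1, this.2.1, this.2.2⟩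
    · simp only [if_neg h]
      exact ⟨le_refl _, by omega, hlow, fun j hj hjl => hhigh j (by omega) hjl⟩

-- inner-loop characterisation: array u ++ v ++ r, everything in u is ≤ x, everything in v is > x,
-- loop shifts v one slot right (first element duplicated), counts |v| writes, records the k-th
theorem solInnerA_spec (k x : Int) :
    ∀ (v u r : List Int) (cnt res : Int) (fuel : Nat),
    (∀ y ∈ u, ¬ x < y) → (∀ y ∈ v, x < y) → r ≠ [] → v.length ≤ fuel →
    solInnerA k fuel (u ++ v ++ r) x ((u.length : Int) + v.length - 1) cnt res =
      ((match v with | [] => u ++ v ++ r | y :: _ => u ++ y :: (v ++ r.tail)),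
       (u.length : Int) - 1, cnt + v.length,
       if cnt < k ∧ k ≤ cnt + v.length then v.getD (v.length - (k - cnt).toNat) 0 else res) := by
  intro v
  induction v using List.reverseRecOn with
  | nil =>
    intro u r cnt res fuel hu hv hr hfuel
    have hres : ¬ (cnt < k ∧ k ≤ cnt + ((([] : List Int).length : Nat) : Int)) := by
      simp only [List.length_nil, Nat.cast_zero, add_zero]; omega
    have hcond : ¬ ((u.length : Int) + (([] : List Int).length : Int) - 1 ≥ 0 ∧
        x < PySem.List.pyGetD (u ++ [] ++ r) ((u.length : Int) + (([] : List Int).length : Int) - 1) 0) := by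
      rintro ⟨h0, hlt⟩
      simp only [List.length_nil, Nat.cast_zero, add_zero] at h0 hlt
      have hul : 1 ≤ u.length := by omega
      have hcast : ((u.length : Int) - 1) = ((u.length - 1 : Nat) : Int) := by omega
      rw [hcast, PySem.List.pyGetD_natCast] at hlt
      rw [List.append_nil] at hlt
      rw [List.getD_append _ _ _ _ (by omega)] at hlt
      have hmem : u.getD (u.length - 1) 0 ∈ u := by
        rw [List.getD_eq_getElem _ _ (by omega)]; exact List.getElem_mem _
      exact hu _ hmem hlt
    cases fuel with
    | zero => simp [solInnerA, hres]
    | succ f =>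
      rw [solInnerA, if_neg hcond]
      simp [hres]
  | append_singleton w y ihw =>
    intro u r cnt res fuel hu hv hr hfuel
    have hfy : x < y := hv y (by simp)
    cases fuel with
    | zero => simp at hfuel
    | succ f =>
      rw [solInnerA]
      have hloccast : ((u.length : Int) + ((w ++ [y]).length : Int) - 1) = ((u.length + w.length : Nat) : Int) := by
        simp; push_cast; ring
      have hread : PySem.List.pyGetD (u ++ (w ++ [y]) ++ r) ((u.length : Int) + ((w ++ [y]).length : Int) - 1) 0 = y := by
        rw [hloccast, PySem.List.pyGetD_natCast]
        rw [List.getD_append _ _ _ _ (by simp)]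
        rw [List.getD_append_right _ _ _ _ (by omega)]
        rw [List.getD_append_right _ _ _ _ (by omega)]
        simp
      have hcond : ((u.length : Int) + ((w ++ [y]).length : Int) - 1 ≥ 0 ∧
          x < PySem.List.pyGetD (u ++ (w ++ [y]) ++ r) ((u.length : Int) + ((w ++ [y]).length : Int) - 1) 0) := by
        refine ⟨by simp; omega, by rw [hread]; exact hfy⟩
      rw [if_pos hcond]
      have hwrite : (u ++ (w ++ [y]) ++ r).set (((u.length : Int) + ((w ++ [y]).length : Int) - 1) + 1).toNat
          (PySem.List.pyGetD (u ++ (w ++ [y]) ++ r) ((u.length : Int) + ((w ++ [y]).length : Int) - 1) 0)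
          = u ++ w ++ ([y] ++ (y :: r.tail)) := by
        rw [hread]
        have hidx : (((u.length : Int) + ((w ++ [y]).length : Int) - 1) + 1).toNat = (u ++ (w ++ [y])).length := by
          simp; push_cast; omega
        rw [hidx, List.set_append_right _ _ (le_refl _)]
        cases r with
        | nil => exact absurd rfl hr
        | cons r0 rt => simp
      rw [hwrite]
      dsimp only
      have hresread : PySem.List.pyGetD (u ++ w ++ ([y] ++ (y :: r.tail)))
          ((((u.length : Int) + ((w ++ [y]).length : Int) - 1) - 1) + 1) 0 = y := by
        have hcast : ((((u.length : Int) + ((w ++ [y]).length : Int) - 1) - 1) + 1) = ((u.length + w.length : Nat) : Int) := by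
          simp; push_cast; ring
        rw [hcast, PySem.List.pyGetD_natCast]
        rw [List.getD_append_right _ _ _ _ (by simp)]
        simp
      rw [hresread]
      have hloc2 : (((u.length : Int) + ((w ++ [y]).length : Int) - 1) - 1) = (u.length : Int) + (w.length : Int) - 1 := by
        simp; push_cast; ring
      rw [hloc2]
      have harr : u ++ w ++ ([y] ++ (y :: r.tail)) = u ++ w ++ ([y] ++ (y :: r.tail)) := rfl
      have hih := ihw u ([y] ++ (y :: r.tail)) (cnt + 1) (if cnt + 1 = k then y else res) f hu
        (fun z hz => hv z (List.mem_append_left _ hz)) (by simp) (by simp at hfuel; omega)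
      rw [hih]
      simp only [Prod.mk.injEq]
      refine ⟨?_, trivial, ?_, ?_⟩
      · cases w with
        | nil => simp
        | cons w0 wt => simp
      · simp; push_cast; ring
      · by_cases h1 : cnt + 1 = k
        · have hc1 : ¬ (cnt + 1 < k ∧ k ≤ cnt + 1 + (w.length : Int)) := by omega
          have hc2 : (cnt < k ∧ k ≤ cnt + (((w ++ [y]).length : Nat) : Int)) := by simp; omega
          rw [if_neg hc1, if_pos hc2, if_pos h1]
          have hidx2 : (w ++ [y]).length - (k - cnt).toNat = w.length := by simp; omega
          rw [hidx2, List.getD_append_right _ _ _ _ (le_refl _)]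
          simp
        · by_cases h2 : cnt + 1 < k ∧ k ≤ cnt + 1 + (w.length : Int)
          · have hc2 : (cnt < k ∧ k ≤ cnt + (((w ++ [y]).length : Nat) : Int)) := by simp; omega
            rw [if_pos h2, if_pos hc2]
            have hidx2 : (w ++ [y]).length - (k - cnt).toNat = w.length - (k - (cnt + 1)).toNat := by
              simp; omega
            rw [hidx2, List.getD_append _ _ _ _ (by omega)]
          · have hc2 : ¬ (cnt < k ∧ k ≤ cnt + (((w ++ [y]).length : Nat) : Int)) := by
              simp only [not_and, not_le] at h2 ⊢; simp; omega
            rw [if_neg h2, if_neg hc2, if_neg h1]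

-- decomposition of the sorted prefix at the insertion point of x
theorem split_spec (s : List Int) (x : Int) (hs : s.Pairwise (· ≤ ·)) :
    bisectR s x 0 s.length ≤ s.length ∧
    (∀ y ∈ s.take (bisectR s x 0 s.length), ¬ x < y) ∧
    (∀ y ∈ s.drop (bisectR s x 0 s.length), x < y) := by
  have h := bisectR_spec s x hs s.length 0 s.length (by omega) (by omega) (le_refl _)
    (fun j hj => absurd hj (by omega)) (fun j hj hjl => absurd (lt_of_le_of_lt hj hjl) (lt_irrefl _))
  refine ⟨h.2.1, ?_, ?_⟩
  · intro y hy
    obtain ⟨j, hj, rfl⟩ := List.mem_iff_getElem.mp hy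
    have hjp : j < bisectR s x 0 s.length := by
      have := hj; simp [List.length_take] at this; omega
    have hjs : j < s.length := by omega
    rw [List.getElem_take]
    have := h.2.2.1 j hjp
    rw [List.getD_eq_getElem _ _ hjs] at this
    omega
  · intro y hy
    obtain ⟨j, hj, rfl⟩ := List.mem_iff_getElem.mp hy
    have hjs : bisectR s x 0 s.length + j < s.length := by
      have := hj; simp [List.length_drop] at this; omega
    rw [List.getElem_drop]
    have := h.2.2.2 (bisectR s x 0 s.length + j) (by omega) hjs
    rw [List.getD_eq_getElem _ _ hjs] at this
    exact this

-- writing just past a prefix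
theorem set_at_append (u r : List Int) (x : Int) :
    (u ++ r).set u.length x = u ++ r.set 0 x := by
  rw [List.set_append_right _ _ (le_refl _)]
  simp

-- one outer-loop step: A on the concatenated array is B on the sorted prefix
theorem step_rel (k : Int) (a s t : List Int) (cnt res : Int)
    (hs : s.Pairwise (· ≤ ·)) (ht : t ≠ [])
    (hx : PySem.List.pyGetD a ((s.length : Nat) : Int) 0 = t.headD 0) :
    solStepA k (s ++ t, cnt, res) (s.length : Int) =
      ((solStepB k a (s, cnt, res) (s.length : Int)).1 ++ t.tail,
       (solStepB k a (s, cnt, res) (s.length : Int)).2) := by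
  obtain ⟨x, tt, rfl⟩ : ∃ t0 tt, t = t0 :: tt := by
    cases t with | nil => exact absurd rfl ht | cons t0 tt => exact ⟨t0, tt, rfl⟩
  have hxv : PySem.List.pyGetD a ((s.length : Nat) : Int) 0 = x := by simpa using hx
  obtain ⟨hple, hu, hv⟩ := split_spec s x hs
  set p : Nat := bisectR s x 0 s.length with hp
  set u : List Int := s.take p with hudef
  set v : List Int := s.drop p with hvdef
  have hulen : u.length = p := by rw [hudef]; simp [List.length_take]; omega
  have hvlen : v.length = s.length - p := by rw [hvdef]; simp
  have hsplit : s = u ++ v := (List.take_append_drop p s).symm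
  have hreadA : PySem.List.pyGetD (s ++ x :: tt) ((s.length : Nat) : Int) 0 = x := by
    rw [PySem.List.pyGetD_natCast, List.getD_append_right _ _ _ _ (le_refl _)]
    simp
  have hinner := solInnerA_spec k x v u (x :: tt) cnt res s.length hu hv (by simp) (by omega)
  rw [show ((u.length : Nat) : Int) + ((v.length : Nat) : Int) - 1 = (s.length : Int) - 1 by
    rw [hulen, hvlen]; omega] at hinner
  rw [← hsplit] at hinner
  have hblen : (s.length : Int) - ((p : Nat) : Int) = ((v.length : Nat) : Int) := by
    rw [hvlen]; omega
  rcases hvcase : v with _ | ⟨y, v'⟩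
  · -- x goes at the end: no shifts, no write
    have hpeq : p = s.length := by
      have h1 := hvlen; rw [hvcase] at h1; simp at h1; omega
    rw [hvcase] at hinner
    dsimp only at hinner
    have hA : solStepA k (s ++ x :: tt, cnt, res) (s.length : Int) = (s ++ x :: tt, cnt, res) := by
      rw [solStepA]
      simp only [hreadA]
      rw [show ((s.length : Int)).toNat = s.length by omega]
      rw [hinner]
      have hcond : ¬ (((u.length : Nat) : Int) - 1 + 1 ≠ (s.length : Int)) := by
        rw [hulen, hpeq]; simp
      rw [if_neg hcond]
      have hres0 : ¬ (cnt < k ∧ k ≤ cnt + ((0 : Nat) : Int)) := by omega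
      have hs2 : s = u := by rw [hsplit, hvcase]; simp
      simp [← hs2, hres0]
    have hB : solStepB k a (s, cnt, res) (s.length : Int) = (s ++ [x], cnt, res) := by
      rw [solStepB]
      simp only [hxv, ← hp]
      rw [if_neg (by rw [hpeq]; omega)]
      rw [hpeq, PySem.List.insert_natCast s s.length x (le_refl _)]
      simp
    rw [hA, hB]
    simp
  · -- v nonempty: v is shifted one slot right, x is written at position p
    have hplt : p < s.length := by
      have h1 := hvlen; rw [hvcase] at h1; simp at h1; omega
    have hmpos : (0 : Int) < (s.length : Int) - ((p : Nat) : Int) := by omega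
    rw [hvcase] at hinner
    dsimp only at hinner
    have hA : solStepA k (s ++ x :: tt, cnt, res) (s.length : Int) =
        ((u ++ x :: (y :: v')) ++ tt,
          cnt + (((y :: v').length : Nat) : Int) + 1,
          if cnt + (((y :: v').length : Nat) : Int) + 1 = k then x
          else if cnt < k ∧ k ≤ cnt + (((y :: v').length : Nat) : Int) then
            (y :: v').getD ((y :: v').length - (k - cnt).toNat) 0
          else res) := by
      rw [solStepA]
      simp only [hreadA]
      rw [show ((s.length : Int)).toNat = s.length by omega]
      rw [hinner]
      have hcond : (((u.length : Nat) : Int) - 1 + 1 ≠ (s.length : Int)) := by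
        rw [hulen]; intro hc; omega
      rw [if_pos hcond]
      have hloc : ((u.length : Nat) : Int) - 1 + 1 = ((u.length : Nat) : Int) := by omega
      rw [hloc]
      rw [show (((u.length : Nat) : Int)).toNat = u.length by omega]
      rw [set_at_append]
      have hres2 : PySem.List.pyGetD (u ++ (y :: (y :: v' ++ (x :: tt).tail)).set 0 x)
          ((u.length : Nat) : Int) 0 = x := by
        rw [PySem.List.pyGetD_natCast]
        rw [List.getD_append_right _ _ _ _ (le_refl _)]
        simp
      rw [hres2]
      have harr : u ++ (y :: (y :: v' ++ (x :: tt).tail)).set 0 x = (u ++ x :: (y :: v')) ++ tt := by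
        simp
      rw [harr]
    have hB : solStepB k a (s, cnt, res) (s.length : Int) =
        (u ++ x :: (y :: v'),
          cnt + ((s.length : Int) - ((p : Nat) : Int)) + 1,
          if cnt < k ∧ k ≤ cnt + ((s.length : Int) - ((p : Nat) : Int)) then
            PySem.List.pyGetD s ((s.length : Int) - (k - cnt)) 0
          else if k = cnt + ((s.length : Int) - ((p : Nat) : Int)) + 1 then x
          else res) := by
      rw [solStepB]
      simp only [hxv, ← hp]
      rw [if_pos hmpos]
      rw [PySem.List.insert_natCast s p x hple, ← hudef, ← hvdef, hvcase]
    rw [hA, hB]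
    have hmm : ((s.length : Int) - ((p : Nat) : Int)) = (((y :: v').length : Nat) : Int) := by
      rw [hblen, hvcase]
    rw [hmm]
    simp only [Prod.mk.injEq]
    refine ⟨rfl, trivial, ?_⟩
    by_cases h1 : k = cnt + (((y :: v').length : Nat) : Int) + 1
    · rw [if_pos (by omega), if_neg (by omega), if_pos h1]
    · by_cases h2 : cnt < k ∧ k ≤ cnt + (((y :: v').length : Nat) : Int)
      · rw [if_neg (by omega), if_pos h2, if_pos h2]
        -- the k-th shifted value, read off the sorted prefix
        have hlen2 : s.length = p + v'.length + 1 := by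
          have h1 := hvlen; rw [hvcase] at h1; simp at h1; omega
        have hkcnt : 1 ≤ k - cnt ∧ k - cnt ≤ (y :: v').length := by
          simp only [List.length_cons] at h2 ⊢; push_cast at h2 ⊢; omega
        have hkidx : ((s.length : Int) - (k - cnt)) =
            ((p + ((y :: v').length - (k - cnt).toNat) : Nat) : Int) := by
          simp only [List.length_cons] at hkcnt ⊢
          push_cast
          omega
        rw [hkidx, PySem.List.pyGetD_natCast]
        conv_rhs => rw [hsplit, hvcase]
        rw [List.getD_append_right _ _ _ _ (by rw [hulen]; omega)]
        rw [hulen]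
        congr 1
        omega
      · rw [if_neg (by omega), if_neg h2, if_neg h2, if_neg h1]

-- B's step always produces the insertion of x at its bisection point
theorem stepB_fst (k : Int) (a s : List Int) (cnt res i : Int) :
    (solStepB k a (s, cnt, res) i).1 =
      PySem.List.insert s ((bisectR s (PySem.List.pyGetD a i 0) 0 s.length : Nat) : Int)
        (PySem.List.pyGetD a i 0) := by
  rw [solStepB]
  split <;> rfl

-- inserting at the bisection point keeps the prefix sorted and grows it by one
theorem insert_sorted (s : List Int) (x : Int) (hs : s.Pairwise (· ≤ ·)) :
    (PySem.List.insert s ((bisectR s x 0 s.length : Nat) : Int) x).Pairwise (· ≤ ·) ∧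
    (PySem.List.insert s ((bisectR s x 0 s.length : Nat) : Int) x).length = s.length + 1 := by
  obtain ⟨hple, hu, hv⟩ := split_spec s x hs
  rw [PySem.List.insert_natCast s _ x hple]
  constructor
  · rw [List.pairwise_append]
    refine ⟨hs.sublist (List.take_sublist _ _), ?_, ?_⟩
    · rw [List.pairwise_cons]
      exact ⟨fun y hy => le_of_lt (hv y hy), hs.sublist (List.drop_sublist _ _)⟩
    · intro b hb c hc
      rcases List.mem_cons.mp hc with rfl | hc2
      · exact le_of_not_gt (hu b hb)
      · exact le_trans (le_of_not_gt (hu b hb)) (le_of_lt (hv c hc2))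
  · simp only [List.length_append, List.length_cons, List.length_take, List.length_drop]
    omega

-- the first element of a dropped suffix, as an indexed read
theorem headD_drop (l : List Int) (j : Nat) (d : Int) : (l.drop j).headD d = l.getD j d := by
  simp [List.headD_eq_head?_getD, List.head?_eq_getElem?, List.getD_eq_getElem?_getD]

-- outer loop: A folding over the mutated array equals B folding over the sorted prefix
theorem outer_rel (k n : Int) (a0 : List Int) (hn : n ≤ (a0.length : Int)) :
    ∀ (d : Nat) (i : Int) (s : List Int) (cnt res : Int),
    (n - i).toNat ≤ d → 1 ≤ i → (s.length : Int) = i → s.Pairwise (· ≤ ·) →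
    ((PySem.List.pyRange i n 1).foldl (solStepA k) (s ++ a0.drop i.toNat, cnt, res)).2
      = ((PySem.List.pyRange i n 1).foldl (solStepB k a0) (s, cnt, res)).2 := by
  intro d
  induction d with
  | zero =>
    intro i s cnt res hd hi hlen hs
    rw [PySem.List.pyRange_one_eq_nil (by omega)]
    rfl
  | succ d ih =>
    intro i s cnt res hd hi hlen hs
    by_cases hlt : i < n
    · rw [PySem.List.pyRange_one_cons hlt]
      simp only [List.foldl_cons]
      subst hlen
      rw [show ((s.length : Int)).toNat = s.length by omega]
      have hslt : s.length < a0.length := by omega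
      have ht : a0.drop s.length ≠ [] := by
        intro hc
        rw [List.drop_eq_nil_iff] at hc
        omega
      have hx : PySem.List.pyGetD a0 ((s.length : Nat) : Int) 0 = (a0.drop s.length).headD 0 := by
        rw [PySem.List.pyGetD_natCast, headD_drop]
      rw [step_rel k a0 s (a0.drop s.length) cnt res hs ht hx]
      have htail : (a0.drop s.length).tail = a0.drop (s.length + 1) := List.tail_drop
      rw [htail]
      have hins := insert_sorted s (PySem.List.pyGetD a0 ((s.length : Nat) : Int) 0) hs
      have hfst := stepB_fst k a0 s cnt res ((s.length : Nat) : Int)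
      have hlen' : (((solStepB k a0 (s, cnt, res) ((s.length : Nat) : Int)).1).length : Int)
          = (s.length : Int) + 1 := by
        rw [hfst, hins.2]
        norm_cast
      have hs' : ((solStepB k a0 (s, cnt, res) ((s.length : Nat) : Int)).1).Pairwise (· ≤ ·) := by
        rw [hfst]; exact hins.1
      have hdrop' : a0.drop (s.length + 1) = a0.drop ((s.length : Int) + 1).toNat := by
        rw [show ((s.length : Int) + 1).toNat = s.length + 1 by omega]
      rw [hdrop']
      exact ih ((s.length : Int) + 1) (solStepB k a0 (s, cnt, res) ((s.length : Nat) : Int)).1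
        (solStepB k a0 (s, cnt, res) ((s.length : Nat) : Int)).2.1
        (solStepB k a0 (s, cnt, res) ((s.length : Nat) : Int)).2.2
        (by omega) (by omega) hlen' hs'
    · rw [PySem.List.pyRange_one_eq_nil (by omega)]
      rfl

-- ===== VERDICT (by name: the statement is the Claim_ definition above) =====
theorem solution_spec : Claim_equal_solution := by
  intro n k a hdom hpre
  show solution n k a = solution_alt n k a
  rw [solution, solution_alt]
  by_cases h : 1 < n
  · obtain ⟨a0, arest, rfl⟩ : ∃ h t, a = h :: t := by
      cases a with
      | nil => simp [Pre_solution] at hpre; omega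
      | cons a0 arest => exact ⟨a0, arest, rfl⟩
    have hslice : PySem.List.slice (a0 :: arest) none (some 1) = [a0] := by
      rw [PySem.List.slice_to _ (by omega)]
      rfl
    rw [hslice]
    have hinit : a0 :: arest = [a0] ++ (a0 :: arest).drop ((1 : Int)).toNat := by simp
    conv_lhs => rw [hinit]
    rw [outer_rel k n (a0 :: arest) hpre (n - 1).toNat 1 [a0] 0 0 (by omega) (by omega)
      (by simp) (by simp)]
  · rw [PySem.List.pyRange_one_eq_nil (by omega)]
    rfl
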